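-- pv_equiv track=rewrite | github.com/bhs128/apsystems-dashboard | vue_ingest.py | build_col_index
-- ===== SOURCE A (Python) =====
-- def build_col_index(header, mapping):
--     """Map CSV column indices to DB column names using substring matching."""
--     idx = {}
--     for i, col in enumerate(header):
--         if i == 0:
--             continue  # skip timestamp
--         for pattern, db_col in mapping.items():
--             if pattern in col:
--                 idx[i] = db_col
--                 break
--     return idx
-- ===== SOURCE B (Python) =====
-- def build_col_index(header, mapping):
--     """Map CSV column indices to DB column names using substring matching."""
--     def first_db(col):
--         return next((db for pat, db in mapping.items() if pat in col), None)
--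
--     def go(i, cols):
--         if not cols:
--             return {}
--         rest = go(i + 1, cols[1:])
--         db = first_db(cols[0])
--         return rest if db is None else {i: db, **rest}
--
--     return go(1, header[1:])
-- ===== Notes on version B (the rewrite author's own statement) =====
-- stated objective: alternative
-- what changed: B replaces A's nested imperative loops and dict mutation with a recursive decomposition over the header tail that builds the result dict back-to-front, using a first-match generator (next) per column instead of an inner loop with break.
import Mathlib
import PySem

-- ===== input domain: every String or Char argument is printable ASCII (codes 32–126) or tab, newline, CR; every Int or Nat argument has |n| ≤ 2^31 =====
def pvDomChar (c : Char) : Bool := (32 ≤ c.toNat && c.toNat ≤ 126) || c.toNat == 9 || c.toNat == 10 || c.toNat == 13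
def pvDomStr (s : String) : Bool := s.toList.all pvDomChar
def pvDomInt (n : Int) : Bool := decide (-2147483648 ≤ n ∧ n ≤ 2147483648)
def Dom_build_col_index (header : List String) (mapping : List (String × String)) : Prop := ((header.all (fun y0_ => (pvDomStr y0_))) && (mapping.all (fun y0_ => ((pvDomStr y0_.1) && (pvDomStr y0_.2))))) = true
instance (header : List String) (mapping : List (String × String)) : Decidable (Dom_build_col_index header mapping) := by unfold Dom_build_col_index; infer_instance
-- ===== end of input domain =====

-- B rebuilds the dict by recursion over the header tail (back-to-front), with a first-match helper per column; objective: alternative decomposition, same cost.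

-- ===== PORT A =====
-- inner 'for pattern, db_col in mapping.items(): if pattern in col: idx[i] = db_col; break'
def pvInnerA (i : Int) (col : String) (idx : PySem.Dict Int String) : List (String × String) → PySem.Dict Int String
  | [] => idx
  | (pat, db) :: rest =>
      if PySem.Str.isIn pat col then idx.insert i db else pvInnerA i col idx rest

def build_col_index (header : List String) (mapping : List (String × String)) : List (Int × String) :=
  ((PySem.List.enumerate header 0).foldl
    (fun idx ic => if ic.1 == 0 then idx else pvInnerA ic.1 ic.2 idx mapping)
    PySem.Dict.empty).items

-- ===== PORT B =====
-- 'next((db for pat, db in mapping.items() if pat in col), None)'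
def pvFirstDb (mapping : List (String × String)) (col : String) : Option String :=
  (mapping.find? (fun m => PySem.Str.isIn m.1 col)).map (·.2)

-- 'def go(i, cols): …' — recursion on the column list; '{i: db, **rest}' is the fold of rest's items into {i: db}
def pvGo (mapping : List (String × String)) (i : Int) : List String → PySem.Dict Int String
  | [] => PySem.Dict.empty
  | c :: cs =>
      let rest := pvGo mapping (i + 1) cs
      match pvFirstDb mapping c with
      | none => rest
      | some db => rest.items.foldl (fun d kv => d.insert kv.1 kv.2) (PySem.Dict.empty.insert i db)

def build_col_index_alt (header : List String) (mapping : List (String × String)) : List (Int × String) :=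
  (pvGo mapping 1 (PySem.List.slice header (some 1) none)).items

-- ===== PRECONDITION & SPEC =====
def Spec_build_col_index (header : List String) (mapping : List (String × String)) (out : List (Int × String)) : Prop := out = build_col_index_alt header mapping
instance (header : List String) (mapping : List (String × String)) (out : List (Int × String)) : Decidable (Spec_build_col_index header mapping out) := by unfold Spec_build_col_index; infer_instance

-- ===== CLAIM (what is proved, stated in full; the proofs are below) =====
def Claim_equal_build_col_index : Prop := ∀ (header : List String) (mapping : List (String × String)), Dom_build_col_index header mapping → Spec_build_col_index header mapping (build_col_index header mapping)

-- ===== LEMMAS AND PROOFS =====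

theorem pvInnerA_eq (i : Int) (col : String) (idx : PySem.Dict Int String) (mapping : List (String × String)) :
    pvInnerA i col idx mapping = match pvFirstDb mapping col with
      | some db => idx.insert i db
      | none => idx := by
  induction mapping with
  | nil => rfl
  | cons m rest ih =>
    obtain ⟨pat, db⟩ := m
    by_cases h : PySem.Chars.isIn pat.toList col.toList = true
    · simp [pvInnerA, pvFirstDb, List.find?, PySem.Str.isIn_eq, h]
    · simp only [pvInnerA, pvFirstDb, List.find?, PySem.Str.isIn_eq] at *
      simp [h, ih]

-- A's loop, characterized: skip index 0, first matching pattern per column, in index order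
theorem pvA_items (mapping : List (String × String)) (l : List (Int × String)) (d : PySem.Dict Int String)
    (hfresh : ∀ p ∈ l, d.contains p.1 = false)
    (hnd : l.Pairwise (fun p q => p.1 ≠ q.1)) :
    (l.foldl (fun idx ic => if ic.1 == 0 then idx else pvInnerA ic.1 ic.2 idx mapping) d).items
      = d.items ++ l.filterMap (fun ic => if ic.1 = 0 then none else (pvFirstDb mapping ic.2).map (fun v => (ic.1, v))) := by
  induction l generalizing d with
  | nil => simp
  | cons ic l ih =>
    rcases List.pairwise_cons.mp hnd with ⟨hh, ht⟩
    simp only [List.foldl_cons]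
    by_cases h0 : ic.1 = 0
    · have hb : (ic.1 == 0) = true := by simpa using h0
      rw [if_pos hb, ih d (fun p hp => hfresh p (List.mem_cons_of_mem _ hp)) ht, List.filterMap_cons]
      simp [h0]
    · have hb : ¬(ic.1 == 0) = true := by simpa using h0
      rcases hf : pvFirstDb mapping ic.2 with _ | db
      · rw [if_neg hb, pvInnerA_eq, hf,
          ih d (fun p hp => hfresh p (List.mem_cons_of_mem _ hp)) ht, List.filterMap_cons]
        simp [h0, hf]
      · have hfr : d.contains ic.1 = false := hfresh ic List.mem_cons_self
        have hins := PySem.Dict.items_insert_of_not_contains (d := d) (k := ic.1) (v := db) (by simpa using hfr)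
        rw [if_neg hb, pvInnerA_eq, hf,
          ih (d.insert ic.1 db) (fun p hp => by
            rw [PySem.Dict.contains_insert]
            simp [Ne.symm (hh p hp), hfresh p (List.mem_cons_of_mem _ hp)]) ht,
          List.filterMap_cons]
        simp [h0, hf, hins]

-- B's recursion, characterized: same first-match filterMap over the enumerated columns
theorem pvGo_items (mapping : List (String × String)) (cs : List String) (i : Int) :
    (pvGo mapping i cs).items
      = (PySem.List.enumerate cs i).filterMap (fun ic => (pvFirstDb mapping ic.2).map (fun v => (ic.1, v))) := by
  induction cs generalizing i with
  | nil => rfl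
  | cons c cs ih =>
    rw [PySem.List.enumerate_cons, List.filterMap_cons]
    have hrest := ih (i + 1)
    have hkeylt : ∀ p ∈ (pvGo mapping (i + 1) cs).items, i < p.1 := by
      intro p hp
      rw [hrest] at hp
      obtain ⟨ic, hmem, hf⟩ := List.mem_filterMap.mp hp
      obtain ⟨k, hk, rfl⟩ := (PySem.List.mem_enumerate_iff _ _ _).mp hmem
      obtain ⟨v, hv, rfl⟩ := Option.map_eq_some_iff.mp hf
      simp
      omega
    have hpw : ((pvGo mapping (i + 1) cs).items.map (·.1)).Nodup := by
      rw [hrest]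
      have hpl : ((PySem.List.enumerate cs (i + 1)).filterMap
          (fun ic => (pvFirstDb mapping ic.2).map (fun v => (ic.1, v)))).Pairwise
          (fun p q : Int × String => p.1 < q.1) := by
        rw [List.pairwise_filterMap]
        apply List.Pairwise.imp ?_ (PySem.List.pairwise_lt_enumerate cs (i + 1))
        intro a b hab x hx y hy
        rcases hfa : pvFirstDb mapping a.2 with _ | v <;> rcases hfb : pvFirstDb mapping b.2 with _ | w <;>
          simp [hfa, hfb] at hx hy
        subst hx; subst hy; exact hab
      exact List.pairwise_map.mpr (hpl.imp fun h => ne_of_lt h)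
    rcases hfd : pvFirstDb mapping c with _ | db
    · simp only [pvGo, hfd]
      exact hrest
    · simp only [pvGo, hfd]
      have hfr : ∀ p ∈ (pvGo mapping (i + 1) cs).items,
          ((PySem.Dict.empty : PySem.Dict Int String).insert i db).contains p.1 = false := by
        intro p hp
        have := hkeylt p hp
        simp [PySem.Dict.contains_insert]
        omega
      rw [PySem.Dict.items_foldl_insert_fresh ((pvGo mapping (i + 1) cs).items) (·.1) (·.2)
          ((PySem.Dict.empty : PySem.Dict Int String).insert i db) hfr hpw]
      rw [show ((PySem.Dict.empty : PySem.Dict Int String).insert i db).items = [(i, db)] from rfl]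
      simp [hrest]

-- ===== VERDICT (by name: the statement is the Claim_ definition above) =====
theorem build_col_index_spec : Claim_equal_build_col_index := by
  intro header mapping _
  unfold Spec_build_col_index build_col_index build_col_index_alt
  have hndA : (PySem.List.enumerate header 0).Pairwise (fun p q : Int × String => p.1 ≠ q.1) :=
    List.Pairwise.imp (fun h => ne_of_lt h) (PySem.List.pairwise_lt_enumerate header 0)
  rw [pvA_items mapping (PySem.List.enumerate header 0) PySem.Dict.empty (fun p _ => by simp) hndA,
    PySem.List.slice_from_one, pvGo_items]
  rw [show (PySem.Dict.empty : PySem.Dict Int String).items = [] from rfl, List.nil_append]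
  cases header with
  | nil => rfl
  | cons h t =>
    rw [PySem.List.enumerate_cons, List.filterMap_cons]
    simp only [List.tail_cons]
    rw [show (0 : Int) + 1 = 1 from rfl]
    apply List.filterMap_congr
    intro ic hmem
    obtain ⟨k, hk, rfl⟩ := (PySem.List.mem_enumerate_iff _ _ _).mp hmem
    have : ¬((1 : Int) + k = 0) := by omega
    simp [this]
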